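-- pv_equiv track=rewrite | github.com/lukar-arthur/3.0.0_MT5_Level_Bot | modules/collector/collector.py | _is_local_low
-- ===== SOURCE A (Python) =====
-- def _is_local_low(rates: list, idx: int,
--                    left: int, right: int) -> bool:
--     if idx < left or idx > len(rates) - 1 - right:
--         return False
--     low = rates[idx]["low"]
--     for j in range(idx - left, idx + right + 1):
--         if j == idx:
--             continue
--         if rates[j]["low"] <= low:
--             return False
--     return True
-- ===== SOURCE B (Python) =====
-- def _is_local_low(rates: list, idx: int,
--                   left: int, right: int) -> bool:
--     if idx < left or idx > len(rates) - 1 - right: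
--         return False
--     low = rates[idx]["low"]
--     w = sorted(rates[j]["low"] for j in range(idx - left, idx + right + 1))
--     return w[0] == low and (len(w) == 1 or low < w[1])
-- ===== Notes on version B (the rewrite author's own statement) =====
-- stated objective: alternative
-- what changed: B replaces A's per-neighbor short-circuit comparison loop by sorting the whole window once and inspecting only the two smallest elements: idx is a local low iff the sorted window starts with rates[idx]['low'] and the next element (if any) is strictly greater.
-- outside the precondition, e.g. on _is_local_low([{'low': 5}], 0, -1, 0): A returns True, B raises IndexError; on _is_local_low([{'low': 5}, {'low': 9}], 0, -1, 1): A returns True, B returns False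
import Mathlib
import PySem

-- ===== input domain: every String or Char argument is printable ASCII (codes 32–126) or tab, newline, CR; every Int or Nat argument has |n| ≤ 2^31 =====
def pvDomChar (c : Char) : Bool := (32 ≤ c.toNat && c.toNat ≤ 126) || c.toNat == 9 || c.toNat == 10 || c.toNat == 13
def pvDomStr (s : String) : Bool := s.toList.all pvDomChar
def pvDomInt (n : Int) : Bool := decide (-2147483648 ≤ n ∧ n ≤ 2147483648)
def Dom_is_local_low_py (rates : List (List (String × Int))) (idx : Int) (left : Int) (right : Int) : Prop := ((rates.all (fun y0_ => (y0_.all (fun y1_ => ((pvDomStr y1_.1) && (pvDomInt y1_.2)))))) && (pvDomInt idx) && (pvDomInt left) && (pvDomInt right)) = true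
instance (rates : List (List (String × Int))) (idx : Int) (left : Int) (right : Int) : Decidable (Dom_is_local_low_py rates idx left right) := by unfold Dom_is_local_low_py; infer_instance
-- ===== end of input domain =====

-- B sorts the whole window once and inspects only its two smallest elements instead of
-- comparing every neighbour against the center in a short-circuit loop; same result,
-- different algorithm (sort-then-inspect).

-- ===== PORT A =====
-- rates[j]["low"]: dict as association list, first match (shared accessor, identical in both Pythons)
def getLowAt (rates : List (List (String × Int))) (j : Int) : Option Int :=
  (PySem.List.pyGet? rates j).bind (fun r => List.lookup "low" r)

-- the for-loop of A with its early returns (none = KeyError/IndexError, excluded by Pre_)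
def aLoop (rates : List (List (String × Int))) (idx low : Int) : List Int → Bool
  | [] => true
  | j :: js =>
    if j = idx then aLoop rates idx low js
    else
      match getLowAt rates j with
      | none => false
      | some v => if v ≤ low then false else aLoop rates idx low js

def is_local_low_py (rates : List (List (String × Int))) (idx : Int) (left : Int) (right : Int) : Bool :=
  if idx < left ∨ idx > (rates.length : Int) - 1 - right then false
  else
    match getLowAt rates idx with
    | none => false  -- KeyError, excluded by Pre_
    | some low => aLoop rates idx low (PySem.List.pyRange (idx - left) (idx + right + 1) 1)

-- ===== PORT B =====
def is_local_low_py_alt (rates : List (List (String × Int))) (idx : Int) (left : Int) (right : Int) : Bool :=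
  if idx < left ∨ idx > (rates.length : Int) - 1 - right then false
  else
    match getLowAt rates idx with
    | none => false  -- KeyError, excluded by Pre_
    | some low =>
      let w := PySem.List.sorted
        ((PySem.List.pyRange (idx - left) (idx + right + 1) 1).map
          (fun j => (getLowAt rates j).getD 0)) (fun x => x) false
      -- w[0] == low and (len(w) == 1 or low < w[1]); w = [] is Python's IndexError, excluded by Pre_
      match w with
      | [] => false
      | [a] => a == low
      | a :: b :: _ => a == low && decide (low < b)

-- ===== PRECONDITION & SPEC =====
-- Pre_ admits all inputs rejected by the bounds guard (both programs return False without
-- touching rates) and, for inputs passing the guard, requires the natural domain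
-- 0 ≤ left, 0 ≤ right and every bar carrying a "low" key: outside it A raises KeyError,
-- or (for negative left/right) A's value rests on Python negative-index wraparound /
-- an idx-free window while B's w[0] on the empty window raises IndexError.
def Pre_is_local_low_py (rates : List (List (String × Int))) (idx : Int) (left : Int) (right : Int) : Prop :=
  (idx < left ∨ idx > (rates.length : Int) - 1 - right) ∨
  (0 ≤ left ∧ 0 ≤ right ∧ ∀ r ∈ rates, (List.lookup "low" r).isSome)
instance (rates : List (List (String × Int))) (idx : Int) (left : Int) (right : Int) : Decidable (Pre_is_local_low_py rates idx left right) := by unfold Pre_is_local_low_py; infer_instance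

def pvWitness_is_local_low_py : (List (List (String × Int))) × Int × Int × Int :=
  ([[("low", 5)], [("low", 3)], [("low", 7)]], 1, 1, 1)

def Spec_is_local_low_py (rates : List (List (String × Int))) (idx : Int) (left : Int) (right : Int) (out : Bool) : Prop := out = is_local_low_py_alt rates idx left right
instance (rates : List (List (String × Int))) (idx : Int) (left : Int) (right : Int) (out : Bool) : Decidable (Spec_is_local_low_py rates idx left right out) := by unfold Spec_is_local_low_py; infer_instance

-- ===== CLAIM (what is proved, stated in full; the proofs are below) =====
def Claim_equal_is_local_low_py : Prop := ∀ (rates : List (List (String × Int))) (idx : Int) (left : Int) (right : Int), Dom_is_local_low_py rates idx left right → Pre_is_local_low_py rates idx left right → Spec_is_local_low_py rates idx left right (is_local_low_py rates idx left right)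

-- ===== LEMMAS AND PROOFS =====

-- A's loop, absent early exits, is an `all` over the range (given no lookup fails)
theorem aLoop_eq_all (rates : List (List (String × Int))) (idx low : Int) (L : List Int)
    (h : ∀ j ∈ L, (getLowAt rates j).isSome) :
    aLoop rates idx low L
      = L.all (fun j => j == idx || decide (low < (getLowAt rates j).getD 0)) := by
  induction L with
  | nil => rfl
  | cons j js ih =>
    have hj : (getLowAt rates j).isSome := h j (by simp)
    have hrest : ∀ x ∈ js, (getLowAt rates x).isSome := fun x hx => h x (by simp [hx])
    cases hv : getLowAt rates j with
    | none => simp [hv] at hj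
    | some v =>
      by_cases hji : j = idx
      · simp [aLoop, hji, ih hrest]
      · simp only [aLoop, List.all_cons, hv, if_neg hji]
        by_cases hle : v ≤ low
        · simp [hle, hji, show ¬ low < v by omega]
        · simp [hle, show low < v by omega, ih hrest]

-- B's inspection of the two smallest elements of the sorted window, characterised:
-- it is true iff every window element other than the distinguished occurrence of `low`
-- is strictly greater than `low`.
theorem sorted_two_smallest (v1 v2 : List Int) (low : Int) :
    ((match PySem.List.sorted (v1 ++ low :: v2) (fun x => x) false with
     | [] => false
     | [a] => a == low
     | a :: b :: _ => a == low && decide (low < b)) = true)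
    ↔ ((∀ x ∈ v1, low < x) ∧ (∀ x ∈ v2, low < x)) := by
  set L := v1 ++ low :: v2 with hL
  have hperm : (PySem.List.sorted L (fun x => x) false).Perm L := PySem.List.sorted_perm L _ _
  have hlowL : low ∈ L := by simp [hL]
  have hcountL : L.count low = v1.count low + 1 + v2.count low := by
    simp [hL, List.count_append, List.count_cons_self]; omega
  cases hw : PySem.List.sorted L (fun x => x) false with
  | nil =>
    exact absurd (hperm.symm.mem_iff.mp hlowL) (by simp [hw])
  | cons a t =>
    have hhead : ∀ y ∈ L, a ≤ y := by
      intro y hy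
      have := PySem.List.key_head_sorted_le (xs := L) (key := fun x => x) hw y hy
      simpa using this
    have hamem : a ∈ L := hperm.mem_iff.mp (by rw [hw]; simp)
    have halow : a ≤ low := hhead low hlowL
    have hcount : (a :: t).count low = L.count low := by
      rw [← hw]; exact hperm.count_eq low
    cases t with
    | nil =>
      -- singleton window: L has length 1, so v1 = v2 = []
      have hlen : L.length = 1 := by rw [← hperm.length_eq, hw]; rfl
      have hlen' : v1.length + (v2.length + 1) = 1 := by
        simpa [hL, List.length_append] using hlen
      have hv1 : v1 = [] := List.eq_nil_of_length_eq_zero (by omega)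
      have hv2 : v2 = [] := List.eq_nil_of_length_eq_zero (by omega)
      subst hv1; subst hv2
      have ha : a = low := by
        have : a ∈ ([low] : List Int) := by simpa [hL] using hamem
        simpa using this
      simp [ha]
    | cons b r =>
      have hpw : (a :: b :: r).Pairwise (fun x y => x ≤ y) := by
        have := PySem.List.sorted_pairwise (xs := L) (key := fun x => x)
        rw [hw] at this; simpa using this
      have hab : a ≤ b := (List.pairwise_cons.mp hpw).1 b (by simp)
      have hbr : ∀ y ∈ r, b ≤ y := (List.pairwise_cons.mp (List.pairwise_cons.mp hpw).2).1
      simp only [Bool.and_eq_true, beq_iff_eq, decide_eq_true_iff]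
      constructor
      · rintro ⟨ha, hb⟩
        -- a = low and low < b: every element of a::b::r other than the head exceeds low
        have hcount1 : (a :: b :: r).count low = 1 := by
          have hbc : (b :: r).count low = 0 := by
            rw [List.count_eq_zero]
            intro hmem
            rcases List.mem_cons.mp hmem with h | h
            · omega
            · have := hbr low h; omega
          simp [ha, hbc]
        have hc : L.count low = 1 := by rw [← hcount, hcount1]
        have hv1c : v1.count low = 0 := by omega
        have hv2c : v2.count low = 0 := by omega
        rw [List.count_eq_zero] at hv1c hv2c
        constructor
        · intro x hx
          have hle : low ≤ x := by have := hhead x (by simp [hL, hx]); omega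
          rcases lt_or_eq_of_le hle with h | h
          · exact h
          · exact absurd (h ▸ hx) hv1c
        · intro x hx
          have hle : low ≤ x := by have := hhead x (by simp [hL, hx]); omega
          rcases lt_or_eq_of_le hle with h | h
          · exact h
          · exact absurd (h ▸ hx) hv2c
      · rintro ⟨h1, h2⟩
        have hge : ∀ y ∈ L, low ≤ y := by
          intro y hy
          rcases List.mem_append.mp (hL ▸ hy) with h | h
          · exact le_of_lt (h1 y h)
          · rcases List.mem_cons.mp h with h | h
            · omega
            · exact le_of_lt (h2 y h)
        have ha : a = low := le_antisymm halow (hge a hamem)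
        have hc : L.count low = 1 := by
          rw [hcountL,
            List.count_eq_zero.mpr (fun hx => absurd (h1 low hx) (lt_irrefl low)),
            List.count_eq_zero.mpr (fun hx => absurd (h2 low hx) (lt_irrefl low))]
        have hbmem : b ∈ L := hperm.mem_iff.mp (by rw [hw]; simp)
        have hlb : low ≤ b := hge b hbmem
        refine ⟨ha, ?_⟩
        rcases lt_or_eq_of_le hlb with h | h
        · exact h
        · exfalso
          have : (a :: b :: r).count low ≥ 2 := by
            simp [ha, ← h, List.count_cons_self]
          omega

-- ===== VERDICT (by name: the statement is the Claim_ definition above) =====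
theorem is_local_low_py_spec : Claim_equal_is_local_low_py := by
  intro rates idx left right _ hpre
  unfold Spec_is_local_low_py is_local_low_py is_local_low_py_alt
  by_cases hg : idx < left ∨ idx > (rates.length : Int) - 1 - right
  · simp [hg]
  · simp only [if_neg hg]
    rcases hpre with hpre | ⟨h0l, h0r, hall⟩
    · exact absurd hpre hg
    rw [not_or, not_lt, not_lt] at hg
    obtain ⟨hlidx, hidxr⟩ := hg
    have hidx0 : 0 ≤ idx := le_trans h0l hlidx
    have hidxlen : idx < (rates.length : Int) := by omega
    -- every index in the window is in range, so its lookup succeeds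
    have hsome : ∀ j : Int, idx - left ≤ j → j < idx + right + 1 → (getLowAt rates j).isSome := by
      intro j hj1 hj2
      have hj0 : 0 ≤ j := by omega
      have hjlen : j < (rates.length : Int) := by omega
      unfold getLowAt
      rw [PySem.List.pyGet?_of_nonneg rates hj0]
      have hjn : j.toNat < rates.length := by omega
      rw [List.getElem?_eq_getElem hjn]
      exact hall _ (List.getElem_mem hjn)
    have hsidx : (getLowAt rates idx).isSome := hsome idx (by omega) (by omega)
    cases hlowv : getLowAt rates idx with
    | none => simp [hlowv] at hsidx
    | some low =>
      simp only
      -- split the window around idx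
      have hsplit : PySem.List.pyRange (idx - left) (idx + right + 1) 1
          = PySem.List.pyRange (idx - left) idx 1 ++ idx :: PySem.List.pyRange (idx + 1) (idx + right + 1) 1 := by
        rw [PySem.List.pyRange_one_append (idx - left) idx (idx + right + 1) (by omega) (by omega),
            PySem.List.pyRange_one_cons (a := idx) (b := idx + right + 1) (by omega)]
      rw [aLoop_eq_all _ _ _ _ (by
        intro j hj
        have := PySem.List.mem_pyRange_one.mp hj
        exact hsome j this.1 this.2)]
      rw [hsplit]
      set val : Int → Int := fun j => (getLowAt rates j).getD 0 with hval
      have hvidx : val idx = low := by simp [hval, hlowv]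
      rw [List.map_append, List.map_cons, hvidx]
      apply Bool.eq_iff_iff.mpr
      rw [sorted_two_smallest]
      simp only [List.all_append, List.all_cons, Bool.and_eq_true, List.all_eq_true,
        Bool.or_eq_true, beq_iff_eq, decide_eq_true_iff, beq_self_eq_true, Bool.true_or,
        List.forall_mem_map]
      constructor
      · rintro ⟨ha1, _, ha2⟩
        constructor
        · intro j hj
          rcases ha1 j hj with h | h
          · have := PySem.List.mem_pyRange_one.mp hj; omega
          · exact h
        · intro j hj
          rcases ha2 j hj with h | h
          · have := PySem.List.mem_pyRange_one.mp hj; omega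
          · exact h
      · rintro ⟨hb1, hb2⟩
        exact ⟨fun j hj => Or.inr (hb1 j hj), trivial, fun j hj => Or.inr (hb2 j hj)⟩
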